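-- pv_equiv track=rewrite | github.com/MonarcShadow/Seminario_1_proyecto | 2_entrega/malmo/carlos/agente madera_piedra_hierro_diamante_mundo_plano/agente_rl.py | _analizar_grid_material
-- ===== SOURCE A (Python) =====
-- def _analizar_grid_material(grid, orientacion, materiales_objetivo):
--     """
--     Analiza la rejilla 5x5x5 buscando materiales objetivo
--
--     Returns:
--     --------
--     tuple: (material_cerca, material_frente, distancia, mirando_material)
--     """
--     material_cerca = False
--     material_frente = False
--     distancia_material = 0  # 0: lejos, 1: medio, 2: cerca
--     mirando_material = False
--
--     # Mapeo de orientación a dirección de búsqueda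
--     # 0: Norte (-Z), 1: Este (+X), 2: Sur (+Z), 3: Oeste (-X)
--
--     # Índices de la rejilla (5x5x5 = 125 bloques)
--     # Centro: (2, 2, 2) = índice 62
--     # Capa Y=0 (inferior): 0-24
--     # Capa Y=1 (media inferior): 25-49
--     # Capa Y=2 (centro): 50-74
--     # Capa Y=3 (media superior): 75-99
--     # Capa Y=4 (superior): 100-124
--
--     # Buscar en capa central y adyacentes
--     for y_offset in range(5):
--         for x in range(5):
--             for z in range(5):
--                 idx = y_offset * 25 + z * 5 + x
--                 if idx >= len(grid):
--                     continue
--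
--                 bloque = grid[idx]
--                 if bloque in materiales_objetivo:
--                     material_cerca = True
--
--                     # Calcular distancia Manhattan desde centro (2,2,2)
--                     dist = abs(x - 2) + abs(y_offset - 2) + abs(z - 2)
--
--                     if dist <= 2:
--                         distancia_material = 2  # Muy cerca
--                     elif dist <= 4:
--                         distancia_material = max(distancia_material, 1)  # Medio
--
--                     # Verificar si está frente según orientación
--                     if orientacion == 0 and z < 2 and abs(x - 2) <= 1:  # Norte
--                         material_frente = True
--                         if x == 2 and z == 1:
--                             mirando_material = True
--                     elif orientacion == 1 and x > 2 and abs(z - 2) <= 1:  # Este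
--                         material_frente = True
--                         if z == 2 and x == 3:
--                             mirando_material = True
--                     elif orientacion == 2 and z > 2 and abs(x - 2) <= 1:  # Sur
--                         material_frente = True
--                         if x == 2 and z == 3:
--                             mirando_material = True
--                     elif orientacion == 3 and x < 2 and abs(z - 2) <= 1:  # Oeste
--                         material_frente = True
--                         if z == 2 and x == 1:
--                             mirando_material = True
--
--     return material_cerca, material_frente, distancia_material, mirando_material
-- ===== SOURCE B (Python) =====
-- def _analizar_grid_material(grid, orientacion, materiales_objetivo):
--     # Targeted passes: collect hit indices once, then answer each question separately.
--     hits = [i for i in range(125) if i < len(grid) and grid[i] in materiales_objetivo]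
--
--     def coords(i):
--         return i % 5, (i % 25) // 5, i // 25  # (x, z, y)
--
--     def dist(i):
--         x, z, y = coords(i)
--         return abs(x - 2) + abs(z - 2) + abs(y - 2)
--
--     def frente(i):
--         x, z, _ = coords(i)
--         if orientacion == 0:
--             return z < 2 and abs(x - 2) <= 1
--         if orientacion == 1:
--             return x > 2 and abs(z - 2) <= 1
--         if orientacion == 2:
--             return z > 2 and abs(x - 2) <= 1
--         if orientacion == 3:
--             return x < 2 and abs(z - 2) <= 1
--         return False
--
--     def mirando(i):
--         x, z, _ = coords(i)
--         if orientacion == 0: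
--             return x == 2 and z == 1
--         if orientacion == 1:
--             return z == 2 and x == 3
--         if orientacion == 2:
--             return x == 2 and z == 3
--         if orientacion == 3:
--             return z == 2 and x == 1
--         return False
--
--     material_cerca = bool(hits)
--     if any(dist(i) <= 2 for i in hits):
--         distancia_material = 2
--     elif any(dist(i) <= 4 for i in hits):
--         distancia_material = 1
--     else:
--         distancia_material = 0
--     material_frente = any(frente(i) for i in hits)
--     mirando_material = any(mirando(i) for i in hits)
--     return material_cerca, material_frente, distancia_material, mirando_material
-- ===== Notes on version B (the rewrite author's own statement) =====
-- stated objective: simpler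
-- what changed: A's single fused 5x5x5 triple loop mutating four variables is replaced by one pass that collects the hit indices and four independent targeted tests (emptiness, two distance scans, a frente test, a mirando test) over that list, with coordinates decoded from the flat index.
import Mathlib
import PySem

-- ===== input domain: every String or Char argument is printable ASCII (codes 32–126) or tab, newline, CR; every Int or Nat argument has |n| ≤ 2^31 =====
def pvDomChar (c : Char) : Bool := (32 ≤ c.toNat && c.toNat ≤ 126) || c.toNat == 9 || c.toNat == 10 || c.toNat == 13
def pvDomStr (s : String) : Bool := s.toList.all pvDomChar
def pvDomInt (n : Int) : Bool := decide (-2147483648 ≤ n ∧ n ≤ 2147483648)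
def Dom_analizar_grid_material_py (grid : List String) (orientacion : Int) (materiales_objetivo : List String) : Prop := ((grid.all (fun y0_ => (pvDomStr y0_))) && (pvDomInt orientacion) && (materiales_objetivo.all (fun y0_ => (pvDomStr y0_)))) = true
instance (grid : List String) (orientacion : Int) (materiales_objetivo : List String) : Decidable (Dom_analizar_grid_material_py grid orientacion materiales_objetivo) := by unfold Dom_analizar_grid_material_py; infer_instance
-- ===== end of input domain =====

-- B replaces A's fused triple loop by one pass collecting the hit indices and
-- four independent targeted tests over them (objective: simpler decomposition).

-- ===== PORT A =====
-- loop body of A's triple loop, transliterated branch for branch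
def pvStepA (grid : List String) (orientacion : Int) (materiales_objetivo : List String)
    (st : Bool × Bool × Int × Bool) (y_offset x z : Int) : Bool × Bool × Int × Bool :=
  let idx := y_offset * 25 + z * 5 + x
  if idx ≥ (grid.length : Int) then st
  else
    let bloque := PySem.List.pyGetD grid idx ""
    if bloque ∈ materiales_objetivo then
      let material_cerca := true
      let dist : Int := ((x - 2).natAbs : Int) + ((y_offset - 2).natAbs : Int) + ((z - 2).natAbs : Int)
      let distancia_material : Int :=
        if dist ≤ 2 then 2
        else if dist ≤ 4 then max st.2.2.1 1
        else st.2.2.1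
      if orientacion = 0 ∧ z < 2 ∧ ((x - 2).natAbs : Int) ≤ 1 then
        (material_cerca, true, distancia_material, if x = 2 ∧ z = 1 then true else st.2.2.2)
      else if orientacion = 1 ∧ x > 2 ∧ ((z - 2).natAbs : Int) ≤ 1 then
        (material_cerca, true, distancia_material, if z = 2 ∧ x = 3 then true else st.2.2.2)
      else if orientacion = 2 ∧ z > 2 ∧ ((x - 2).natAbs : Int) ≤ 1 then
        (material_cerca, true, distancia_material, if x = 2 ∧ z = 3 then true else st.2.2.2)
      else if orientacion = 3 ∧ x < 2 ∧ ((z - 2).natAbs : Int) ≤ 1 then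
        (material_cerca, true, distancia_material, if z = 2 ∧ x = 1 then true else st.2.2.2)
      else
        (material_cerca, st.2.1, distancia_material, st.2.2.2)
    else st

def analizar_grid_material_py (grid : List String) (orientacion : Int) (materiales_objetivo : List String) : Bool × Bool × Int × Bool :=
  (PySem.List.pyRange 0 5 1).foldl (fun st y_offset =>
    (PySem.List.pyRange 0 5 1).foldl (fun st x =>
      (PySem.List.pyRange 0 5 1).foldl (fun st z =>
        pvStepA grid orientacion materiales_objetivo st y_offset x z) st) st)
    (false, false, 0, false)

-- ===== PORT B =====
-- coords i = (x, z, y) of grid index i (all indices handled are < 125, so Nat // and % match Python's)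
def pvCoordsB (i : Nat) : Int × Int × Int := ((i % 5 : Nat), ((i % 25) / 5 : Nat), (i / 25 : Nat))

def pvDistB (i : Nat) : Int :=
  let (x, z, y) := pvCoordsB i
  ((x - 2).natAbs : Int) + ((z - 2).natAbs : Int) + ((y - 2).natAbs : Int)

def pvFrenteB (orientacion : Int) (i : Nat) : Bool :=
  let (x, z, _) := pvCoordsB i
  if orientacion = 0 then decide (z < 2 ∧ ((x - 2).natAbs : Int) ≤ 1)
  else if orientacion = 1 then decide (x > 2 ∧ ((z - 2).natAbs : Int) ≤ 1)
  else if orientacion = 2 then decide (z > 2 ∧ ((x - 2).natAbs : Int) ≤ 1)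
  else if orientacion = 3 then decide (x < 2 ∧ ((z - 2).natAbs : Int) ≤ 1)
  else false

def pvMirandoB (orientacion : Int) (i : Nat) : Bool :=
  let (x, z, _) := pvCoordsB i
  if orientacion = 0 then decide (x = 2 ∧ z = 1)
  else if orientacion = 1 then decide (z = 2 ∧ x = 3)
  else if orientacion = 2 then decide (x = 2 ∧ z = 3)
  else if orientacion = 3 then decide (z = 2 ∧ x = 1)
  else false

def analizar_grid_material_py_alt (grid : List String) (orientacion : Int) (materiales_objetivo : List String) : Bool × Bool × Int × Bool :=
  let hits := (List.range 125).filter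
    (fun i => decide (i < grid.length) && decide (grid.getD i "" ∈ materiales_objetivo))
  let material_cerca := !hits.isEmpty
  let distancia_material : Int :=
    if hits.any (fun i => decide (pvDistB i ≤ 2)) then 2
    else if hits.any (fun i => decide (pvDistB i ≤ 4)) then 1
    else 0
  let material_frente := hits.any (pvFrenteB orientacion)
  let mirando_material := hits.any (pvMirandoB orientacion)
  (material_cerca, material_frente, distancia_material, mirando_material)

-- ===== PRECONDITION & SPEC =====
def Spec_analizar_grid_material_py (grid : List String) (orientacion : Int) (materiales_objetivo : List String) (out : Bool × Bool × Int × Bool) : Prop := out = analizar_grid_material_py_alt grid orientacion materiales_objetivo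
instance (grid : List String) (orientacion : Int) (materiales_objetivo : List String) (out : Bool × Bool × Int × Bool) : Decidable (Spec_analizar_grid_material_py grid orientacion materiales_objetivo out) := by unfold Spec_analizar_grid_material_py; infer_instance

-- ===== CLAIM (what is proved, stated in full; the proofs are below) =====
def Claim_equal_analizar_grid_material_py : Prop := ∀ (grid : List String) (orientacion : Int) (materiales_objetivo : List String), Dom_analizar_grid_material_py grid orientacion materiales_objetivo → Spec_analizar_grid_material_py grid orientacion materiales_objetivo (analizar_grid_material_py grid orientacion materiales_objetivo)

-- ===== LEMMAS AND PROOFS =====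

-- proof-side predicates on a triple (y, x, z)
def pvHitT (grid materiales_objetivo : List String) (t : Int × Int × Int) : Bool :=
  !decide (t.1 * 25 + t.2.2 * 5 + t.2.1 ≥ (grid.length : Int))
    && decide (PySem.List.pyGetD grid (t.1 * 25 + t.2.2 * 5 + t.2.1) "" ∈ materiales_objetivo)

def pvDistT (t : Int × Int × Int) : Int := ((t.2.1 - 2).natAbs : Int) + ((t.1 - 2).natAbs : Int) + ((t.2.2 - 2).natAbs : Int)

def pvFrenteT (orientacion : Int) (t : Int × Int × Int) : Bool :=
  if orientacion = 0 then decide (t.2.2 < 2 ∧ ((t.2.1 - 2).natAbs : Int) ≤ 1)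
  else if orientacion = 1 then decide (t.2.1 > 2 ∧ ((t.2.2 - 2).natAbs : Int) ≤ 1)
  else if orientacion = 2 then decide (t.2.2 > 2 ∧ ((t.2.1 - 2).natAbs : Int) ≤ 1)
  else if orientacion = 3 then decide (t.2.1 < 2 ∧ ((t.2.2 - 2).natAbs : Int) ≤ 1)
  else false

def pvMirandoT (orientacion : Int) (t : Int × Int × Int) : Bool :=
  if orientacion = 0 then decide (t.2.1 = 2 ∧ t.2.2 = 1)
  else if orientacion = 1 then decide (t.2.2 = 2 ∧ t.2.1 = 3)
  else if orientacion = 2 then decide (t.2.1 = 2 ∧ t.2.2 = 3)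
  else if orientacion = 3 then decide (t.2.2 = 2 ∧ t.2.1 = 1)
  else false

-- the list of triples A's triple loop runs over
def pvT : List (Int × Int × Int) :=
  (PySem.List.pyRange 0 5 1).flatMap (fun y =>
    (PySem.List.pyRange 0 5 1).flatMap (fun x =>
      (PySem.List.pyRange 0 5 1).map (fun z => (y, x, z))))

theorem pv_foldl_flatMap {α β σ : Type} (l : List α) (g : α → List β) (f : σ → β → σ) (init : σ) :
    (l.flatMap g).foldl f init = l.foldl (fun st a => (g a).foldl f st) init := by
  induction l generalizing init with
  | nil => rfl
  | cons a t ih => simp [List.flatMap_cons, List.foldl_append, ih]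

set_option maxHeartbeats 1600000 in
theorem pv_stepA_char (grid : List String) (o : Int) (mats : List String)
    (st : Bool × Bool × Int × Bool) (t : Int × Int × Int) :
    pvStepA grid o mats st t.1 t.2.1 t.2.2
      = (st.1 || pvHitT grid mats t,
         st.2.1 || (pvHitT grid mats t && pvFrenteT o t),
         (if pvHitT grid mats t && decide (pvDistT t ≤ 2) then 2
          else if pvHitT grid mats t && decide (pvDistT t ≤ 4) then max st.2.2.1 1
          else st.2.2.1),
         st.2.2.2 || (pvHitT grid mats t && pvMirandoT o t)) := by
  obtain ⟨y, x, z⟩ := t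
  obtain ⟨mc, mf, dm, mm⟩ := st
  simp only [pvStepA]
  split_ifs <;>
    simp_all [pvHitT, pvFrenteT, pvMirandoT, pvDistT, -Nat.cast_natAbs] <;>
    (try omega) <;>
    by_cases ho0 : o = 0 <;> by_cases ho1 : o = 1 <;>
    by_cases ho2 : o = 2 <;> by_cases ho3 : o = 3 <;>
    simp_all [-Nat.cast_natAbs] <;> omega

theorem pv_foldA_char (grid : List String) (o : Int) (mats : List String)
    (L : List (Int × Int × Int)) (st : Bool × Bool × Int × Bool) :
    L.foldl (fun st t => pvStepA grid o mats st t.1 t.2.1 t.2.2) st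
      = (st.1 || L.any (pvHitT grid mats),
         st.2.1 || L.any (fun t => pvHitT grid mats t && pvFrenteT o t),
         (if L.any (fun t => pvHitT grid mats t && decide (pvDistT t ≤ 2)) then 2
          else if L.any (fun t => pvHitT grid mats t && decide (pvDistT t ≤ 4)) then max st.2.2.1 1
          else st.2.2.1),
         st.2.2.2 || L.any (fun t => pvHitT grid mats t && pvMirandoT o t)) := by
  induction L generalizing st with
  | nil => simp
  | cons a L ih =>
    rw [List.foldl_cons, pv_stepA_char, ih]
    obtain ⟨mc, mf, dm, mm⟩ := st
    simp only [List.any_cons, Prod.mk.injEq]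
    refine ⟨by simp [Bool.or_assoc], by simp [Bool.or_assoc], ?_, by simp [Bool.or_assoc]⟩
    cases h1 : (pvHitT grid mats a && decide (pvDistT a ≤ 2)) <;>
      cases h2 : (pvHitT grid mats a && decide (pvDistT a ≤ 4)) <;>
      cases h3 : L.any (fun t => pvHitT grid mats t && decide (pvDistT t ≤ 2)) <;>
      cases h4 : L.any (fun t => pvHitT grid mats t && decide (pvDistT t ≤ 4)) <;>
      (simp [Int.max_def] <;> (try split_ifs) <;> omega)

theorem pv_anyT (p : Int × Int × Int → Bool) :
    pvT.any p = (List.range 125).any (fun i => p ((i / 25 : Nat), ((i % 5 : Nat)), ((i % 25 / 5 : Nat)))) := by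
  have h : pvT.any p = true ↔
      (List.range 125).any (fun i => p ((i / 25 : Nat), ((i % 5 : Nat)), ((i % 25 / 5 : Nat)))) = true := by
    simp only [List.any_eq_true, pvT, List.mem_flatMap, List.mem_map, List.mem_range,
      PySem.List.mem_pyRange_one]
    constructor
    · rintro ⟨t, ⟨y, ⟨hy0, hy5⟩, x, ⟨hx0, hx5⟩, z, ⟨hz0, hz5⟩, rfl⟩, hp⟩
      refine ⟨y.toNat * 25 + z.toNat * 5 + x.toNat, by omega, ?_⟩
      have e1 : (((y.toNat * 25 + z.toNat * 5 + x.toNat) / 25 : Nat) : Int) = y := by omega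
      have e2 : (((y.toNat * 25 + z.toNat * 5 + x.toNat) % 5 : Nat) : Int) = x := by omega
      have e3 : (((y.toNat * 25 + z.toNat * 5 + x.toNat) % 25 / 5 : Nat) : Int) = z := by omega
      rw [e1, e2, e3]; exact hp
    · rintro ⟨i, hi, hp⟩
      exact ⟨((i / 25 : Nat), ((i % 5 : Nat)), ((i % 25 / 5 : Nat))),
        ⟨(i / 25 : Nat), ⟨by omega, by omega⟩, (i % 5 : Nat), ⟨by omega, by omega⟩,
         (i % 25 / 5 : Nat), ⟨by omega, by omega⟩, rfl⟩, hp⟩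
  exact Bool.coe_iff_coe.mp h

theorem pv_hit_coords (grid mats : List String) (i : Nat) :
    pvHitT grid mats ((i / 25 : Nat), ((i % 5 : Nat)), ((i % 25 / 5 : Nat)))
      = (decide (i < grid.length) && decide (grid.getD i "" ∈ mats)) := by
  have hidx : ((i / 25 : Nat) : Int) * 25 + ((i % 25 / 5 : Nat) : Int) * 5 + ((i % 5 : Nat) : Int)
      = (i : Int) := by omega
  simp only [pvHitT, hidx, PySem.List.pyGetD_natCast, ge_iff_le, Nat.cast_le, ← decide_not,
    Nat.not_le]

theorem pv_fr_coords (o : Int) (i : Nat) :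
    pvFrenteT o ((i / 25 : Nat), ((i % 5 : Nat)), ((i % 25 / 5 : Nat))) = pvFrenteB o i := by
  simp [pvFrenteT, pvFrenteB, pvCoordsB]

theorem pv_mir_coords (o : Int) (i : Nat) :
    pvMirandoT o ((i / 25 : Nat), ((i % 5 : Nat)), ((i % 25 / 5 : Nat))) = pvMirandoB o i := by
  simp [pvMirandoT, pvMirandoB, pvCoordsB]

theorem pv_dist_coords (i : Nat) :
    pvDistT ((i / 25 : Nat), ((i % 5 : Nat)), ((i % 25 / 5 : Nat))) = pvDistB i := by
  simp [pvDistT, pvDistB, pvCoordsB]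
  ring

theorem pv_not_isEmpty_filter {α : Type} (l : List α) (p : α → Bool) :
    (!(l.filter p).isEmpty) = l.any p := by
  induction l with
  | nil => rfl
  | cons a t ih =>
    by_cases h : p a = true <;> simp [h, ih]

-- ===== VERDICT (by name: the statement is the Claim_ definition above) =====
theorem analizar_grid_material_py_spec : Claim_equal_analizar_grid_material_py := by
  intro grid o mats _
  unfold Spec_analizar_grid_material_py
  have hT : pvT.foldl (fun st t => pvStepA grid o mats st t.1 t.2.1 t.2.2)
      (false, false, 0, false) = analizar_grid_material_py grid o mats := by
    unfold pvT analizar_grid_material_py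
    simp only [pv_foldl_flatMap, List.foldl_map]
  rw [← hT, pv_foldA_char]
  simp only [analizar_grid_material_py_alt, pv_not_isEmpty_filter, List.any_filter,
    Bool.false_or, Prod.mk.injEq]
  refine ⟨?_, ?_, ?_, ?_⟩
  · rw [pv_anyT]
    congr 1
    funext i
    exact pv_hit_coords grid mats i
  · rw [pv_anyT]
    congr 1
    funext i
    rw [pv_hit_coords, pv_fr_coords]
  · rw [pv_anyT (fun t => pvHitT grid mats t && decide (pvDistT t ≤ 2)),
        pv_anyT (fun t => pvHitT grid mats t && decide (pvDistT t ≤ 4))]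
    simp only [pv_hit_coords, pv_dist_coords]
    norm_num
  · rw [pv_anyT]
    congr 1
    funext i
    rw [pv_hit_coords, pv_mir_coords]
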